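-- pv_equiv track=rewrite | github.com/jinarma/Python_General | General/listEleReduction.py | reduceArray
-- ===== SOURCE A (Python) =====
-- def reduceArray(array):
-- 	steps_array = []
-- 	while array != []:
-- 		count = 0
-- 		while 0 in array:
-- 			array.remove(0)
-- 			if array == []:
-- 				return steps_array
-- 		minimum = min(array)
-- 		for i, ele in enumerate(array):
-- 			array[i] = ele - minimum
-- 			count += 1
-- 		steps_array.append(count)
-- 	return steps_array
-- ===== SOURCE B (Python) =====
-- def reduceArray(array):
--     # Sort the nonzero elements once; each distinct value v (ascending) removes
--     # one "layer", and the step count for v is the number of elements >= v,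
--     # i.e. n - (index of the first element of v's run in the sorted list).
--     # (Unlike the original, this does not mutate/empty the caller's list.)
--     xs = sorted(x for x in array if x != 0)
--     res = []
--     i, n = 0, len(xs)
--     while i < n:
--         res.append(n - i)
--         v = xs[i]
--         while i < n and xs[i] == v:
--             i += 1
--     return res
-- ===== Notes on version B (the rewrite author's own statement) =====
-- stated objective: faster
-- what changed: Replaces the repeated remove-zeros/min/subtract passes over the whole array with a single sort of the nonzero elements followed by one linear scan that appends the remaining-suffix length at each run start.
import Mathlib
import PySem

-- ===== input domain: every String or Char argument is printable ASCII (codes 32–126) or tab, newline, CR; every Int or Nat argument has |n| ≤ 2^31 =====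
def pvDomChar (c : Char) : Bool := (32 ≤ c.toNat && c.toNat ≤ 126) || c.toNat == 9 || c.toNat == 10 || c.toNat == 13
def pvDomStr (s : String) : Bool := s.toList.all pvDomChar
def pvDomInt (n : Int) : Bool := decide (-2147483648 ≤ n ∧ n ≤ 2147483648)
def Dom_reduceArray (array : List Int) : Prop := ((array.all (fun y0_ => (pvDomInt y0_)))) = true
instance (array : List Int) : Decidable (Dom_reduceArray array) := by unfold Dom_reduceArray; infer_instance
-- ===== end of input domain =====

-- B replaces A's repeated remove-zeros/min/subtract passes with one sort of the nonzero elements plus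
-- a single scan (objective: faster). Equivalence is about the RETURN value only: A empties the caller's
-- list in place, B does not mutate its argument.

-- ===== PORT A =====
-- inner loop 'while 0 in array: array.remove(0); if array == []: return steps_array'
-- (since 0 ∈ a here, PySem.List.remove? a 0 = some (a.erase 0), cf. PySem.List.remove?_eq_some_erase)
def pvRemoveZeros (a : List Int) : List Int :=
  if h : (0 : Int) ∈ a then
    let a' := a.erase 0
    if a' = [] then [] else pvRemoveZeros a'
  else a
termination_by a.length
decreasing_by
  have h1 := List.length_erase_of_mem h
  have h2 := List.length_pos_of_mem h
  omega

-- filtering out zeros is unchanged by erasing one zero (used below)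
theorem pvFilterErase (a : List Int) :
    (a.erase 0).filter (fun x => x != 0) = a.filter (fun x => x != 0) := by
  rw [← List.erase_filter]
  exact List.erase_of_not_mem (by simp)

-- the zero-removal loop computes the zero-free sublist (cited by pvLoopA's termination proof)
theorem pvRemoveZeros_eq (a : List Int) :
    pvRemoveZeros a = a.filter (fun x => x != 0) := by
  induction a using pvRemoveZeros.induct with
  | case1 a h a' he =>
    have he' : a.erase 0 = [] := he
    rw [pvRemoveZeros]
    simp only [dif_pos h]
    rw [← pvFilterErase a]
    simp [he']
  | case2 a h a' hne ih =>
    have hne' : ¬ a.erase 0 = [] := hne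
    rw [pvRemoveZeros]
    simp only [dif_pos h]
    rw [ih, pvFilterErase]
    simp [hne']
  | case3 a h =>
    rw [pvRemoveZeros]
    simp only [dif_neg h]
    exact (List.filter_eq_self.mpr (fun x hx => by simp; rintro rfl; exact h hx)).symm

-- termination measure of A's outer while loop: the number of distinct nonzero values drops each round
theorem pvMuDec (a : List Int) (m : Int)
    (hm : PySem.List.min? (a.filter (fun x => x != 0)) (fun x => x) = some m) :
    ((((a.filter (fun x => x != 0)).map (fun x => x - m)).toFinset.erase 0).card
      < (a.toFinset.erase 0).card) := by
  set a1 := a.filter (fun x => x != 0) with ha1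
  have hmem : m ∈ a1 := PySem.List.min?_mem hm
  have hinj : Function.Injective (fun x : Int => x - m) := fun x y h => by simpa using h
  have h0 : (0 : Int) = (fun x : Int => x - m) m := by simp
  have himg : ((a1.map (fun x => x - m)).toFinset.erase 0)
      = (a1.toFinset.erase m).image (fun x => x - m) := by
    have htm : (a1.map (fun x : Int => x - m)).toFinset = a1.toFinset.image (fun x => x - m) := by
      ext x; simp
    rw [htm, h0, Eq.symm (Finset.image_erase hinj a1.toFinset m)]
  rw [himg, Finset.card_image_of_injective _ hinj]
  have hsub : a1.toFinset ⊆ a.toFinset.erase 0 := by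
    intro x hx
    simp only [List.mem_toFinset, ha1, List.mem_filter, bne_iff_ne] at hx
    simp [Finset.mem_erase, hx.2, hx.1]
  have hcard : (a1.toFinset.erase m).card = a1.toFinset.card - 1 :=
    Finset.card_erase_of_mem (List.mem_toFinset.mpr hmem)
  have hle : a1.toFinset.card ≤ (a.toFinset.erase 0).card := Finset.card_le_card hsub
  have hpos : 0 < a1.toFinset.card := Finset.card_pos.mpr ⟨m, List.mem_toFinset.mpr hmem⟩
  omega

-- A's outer 'while array != []' loop; steps is the accumulated steps_array
def pvLoopA (a : List Int) (steps : List Int) : List Int :=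
  if a = [] then steps
  else
    let a1 := pvRemoveZeros a
    if h1 : a1 = [] then steps   -- the early 'return steps_array' inside the inner loop
    else
      match hm : PySem.List.min? a1 (fun x => x) with
      | none => steps            -- unreachable: a1 ≠ [] (PySem.List.min?_eq_none_iff)
      | some m =>
        -- 'for i, ele in enumerate(array): array[i] = ele - minimum; count += 1'
        let pr := a1.foldl (fun (s : List Int × Int) ele => (s.1 ++ [ele - m], s.2 + 1))
                    (([] : List Int), (0 : Int))
        pvLoopA pr.1 (steps ++ [pr.2])
termination_by (a.toFinset.erase 0).card
decreasing_by
  have hfil := pvRemoveZeros_eq a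
  rw [PySem.List.foldl_prod_mk (f := fun (acc : List Int) ele => acc ++ [ele - m])
        (g := fun (acc : Int) _ => acc + 1)]
  simp only [PySem.List.foldl_append_singleton_eq_map, List.nil_append]
  rw [hfil]
  exact pvMuDec a m (by rw [← hfil]; exact hm)

def reduceArray (array : List Int) : List Int := pvLoopA array []

-- ===== PORT B =====
-- Source B's scan over the sorted nonzero list: at each run start (index i) it appends n - i, the length of
-- the remaining suffix, then skips the run; ported as recursion on that remaining suffix.
def pvRunScan (xs : List Int) : List Int :=
  match xs with
  | [] => []
  | v :: t => ((t.length : Int) + 1) :: pvRunScan (t.dropWhile (fun x => x == v))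
termination_by xs.length
decreasing_by
  have := (List.dropWhile_sublist (l := t) (p := fun x => x == v)).length_le
  simp
  omega

def reduceArray_alt (array : List Int) : List Int :=
  pvRunScan (PySem.List.sorted (array.filter (fun x => x != 0)) (fun x => x) false)

-- ===== PRECONDITION & SPEC =====
def Spec_reduceArray (array : List Int) (out : List Int) : Prop := out = reduceArray_alt array
instance (array : List Int) (out : List Int) : Decidable (Spec_reduceArray array out) := by unfold Spec_reduceArray; infer_instance

-- ===== CLAIM (what is proved, stated in full; the proofs are below) =====
def Claim_equal_reduceArray : Prop := ∀ (array : List Int), Dom_reduceArray array → Spec_reduceArray array (reduceArray array)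

-- ===== LEMMAS AND PROOFS =====

-- the step counts of B's scan are invariant under shifting every element by the round's minimum
theorem pvRunScan_map (l : List Int) (m : Int) :
    pvRunScan (l.map (fun x => x - m)) = pvRunScan l := by
  induction l using pvRunScan.induct with
  | case1 => simp [pvRunScan]
  | case2 v t ih =>
    rw [List.map_cons, pvRunScan, pvRunScan]
    have hd : (t.map (fun x => x - m)).dropWhile (fun x => x == v - m)
        = (t.dropWhile (fun x => x == v)).map (fun x => x - m) := by
      have hp : ((fun x => x == v - m) ∘ fun x : Int => x - m) = (fun x : Int => x == v) := by
        funext x; simp [Function.comp]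
      rw [List.dropWhile_map, hp]
    simp only [List.length_map, hd, ih]

-- shifting commutes with sorting
theorem pvSortedMapShift (l : List Int) (m : Int) :
    PySem.List.sorted (l.map (fun x => x - m)) (fun x => x) false
      = (PySem.List.sorted l (fun x => x) false).map (fun x => x - m) := by
  apply PySem.List.eq_of_perm_of_pairwise_le_of_injective (key := fun x => x) (fun a b h => h)
  · exact (PySem.List.sorted_perm _ _ _).trans ((PySem.List.sorted_perm _ _ _).map _).symm
  · exact PySem.List.sorted_pairwise _ _
  · have := PySem.List.sorted_pairwise (key := fun x : Int => x) l
    exact List.pairwise_map.mpr (this.imp (fun h => by omega))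

-- in a ≤-sorted list whose elements are all ≥ m, the copies of m form a prefix
theorem pvFilterEqDropWhile (m : Int) (l : List Int)
    (hs : l.Pairwise (· ≤ ·)) (hlb : ∀ y ∈ l, m ≤ y) :
    l.filter (fun x => x != m) = l.dropWhile (fun x => x == m) := by
  induction l with
  | nil => rfl
  | cons x t ih =>
    by_cases hx : x = m
    · subst hx
      simp only [List.filter_cons, List.dropWhile_cons]
      simp
      exact ih hs.tail (fun y hy => hlb y (List.mem_cons_of_mem _ hy))
    · have hlt : m < x := lt_of_le_of_ne (hlb x (List.mem_cons_self)) (Ne.symm hx)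
      have hall : ∀ y ∈ x :: t, y ≠ m := by
        intro y hy
        rcases List.mem_cons.mp hy with rfl | hy'
        · exact hx
        · have := (List.pairwise_cons.mp hs).1 y hy'
          omega
      rw [List.dropWhile_cons_of_neg (by simpa using hx)]
      exact List.filter_eq_self.mpr (fun y hy => by simpa using hall y hy)

-- sorting commutes with filtering
theorem pvSortedFilter (l : List Int) (p : Int → Bool) :
    PySem.List.sorted (l.filter p) (fun x => x) false
      = (PySem.List.sorted l (fun x => x) false).filter p := by
  apply PySem.List.eq_of_perm_of_pairwise_le_of_injective (key := fun x => x) (fun a b h => h)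
  · exact (PySem.List.sorted_perm _ _ _).trans ((PySem.List.sorted_perm l _ _).filter p).symm
  · exact PySem.List.sorted_pairwise _ _
  · exact (PySem.List.sorted_pairwise l _).sublist (List.filter_sublist)

-- the head of the ascending sort is Python's min
theorem pvSortedHeadMin (l : List Int) (m v : Int) (t : List Int)
    (hm : PySem.List.min? l (fun x => x) = some m)
    (hs : PySem.List.sorted l (fun x => x) false = v :: t) : v = m := by
  have hvmem : v ∈ l := (PySem.List.mem_sorted _ _ _ _).mp (hs ▸ List.mem_cons_self)
  have hmv : m ≤ v := PySem.List.min?_isMin hm v hvmem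
  have hmmem : m ∈ PySem.List.sorted l (fun x => x) false :=
    (PySem.List.mem_sorted _ _ _ _).mpr (PySem.List.min?_mem hm)
  rw [hs] at hmmem
  rcases List.mem_cons.mp hmmem with rfl | hmem
  · rfl
  · have hp := PySem.List.sorted_pairwise l (key := fun x : Int => x)
    rw [hs] at hp
    have := (List.pairwise_cons.mp hp).1 m hmem
    omega

-- the main invariant: A's loop appends exactly B's sort-and-scan of the current nonzero elements
theorem pvLoopA_eq (a steps : List Int) :
    pvLoopA a steps
      = steps ++ pvRunScan (PySem.List.sorted (a.filter (fun x => x != 0)) (fun x => x) false) := by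
  induction a, steps using pvLoopA.induct with
  | case1 steps =>
    have hnil : PySem.List.sorted ([] : List Int) (fun x => x) false = [] :=
      (PySem.List.sorted_eq_nil_iff _ _ _).mpr rfl
    rw [pvLoopA]
    simp [hnil, pvRunScan]
  | case2 a steps h a1 h1 =>
    have h1' : pvRemoveZeros a = [] := h1
    have hfil : a.filter (fun x => x != 0) = [] := by rw [← pvRemoveZeros_eq a]; exact h1'
    have hnil : PySem.List.sorted (List.filter (fun x => x != 0) a) (fun x => x) false = [] :=
      (PySem.List.sorted_eq_nil_iff _ _ _).mpr hfil
    rw [pvLoopA]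
    simp [h, h1', hnil, pvRunScan]
  | case3 a steps h a1 h1 hm =>
    have h1' : ¬ pvRemoveZeros a = [] := h1
    have hm' : PySem.List.min? (pvRemoveZeros a) (fun x => x) = none := hm
    exact absurd ((PySem.List.min?_eq_none_iff _ _).mp hm') h1'
  | case4 a steps h a1 h1 m hm pr ih =>
    have hfil : pvRemoveZeros a = a.filter (fun x => x != 0) := pvRemoveZeros_eq a
    have h1' : ¬ pvRemoveZeros a = [] := h1
    have hm' : PySem.List.min? (pvRemoveZeros a) (fun x => x) = some m := hm
    have hpr : pr = ((pvRemoveZeros a).map (fun x => x - m), ((pvRemoveZeros a).length : Int)) := by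
      show (pvRemoveZeros a).foldl _ _ = _
      rw [PySem.List.foldl_prod_mk (f := fun (acc : List Int) ele => acc ++ [ele - m])
            (g := fun (acc : Int) _ => acc + 1)]
      rw [PySem.List.foldl_append_singleton_eq_map]
      rw [PySem.List.foldl_add (g := fun _ : Int => (1 : Int))]
      rw [PySem.List.sum_map_const_int]
      simp
    obtain ⟨v, t, hs⟩ : ∃ v t, PySem.List.sorted (pvRemoveZeros a) (fun x => x) false = v :: t := by
      cases hsort : PySem.List.sorted (pvRemoveZeros a) (fun x => x) false with
      | nil => exact absurd ((PySem.List.sorted_eq_nil_iff _ _ _).mp hsort) h1'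
      | cons v t => exact ⟨v, t, rfl⟩
    have hv : v = m := pvSortedHeadMin _ m v t hm' hs
    subst hv
    have hlen : (pvRemoveZeros a).length = t.length + 1 := by
      have hp := (PySem.List.sorted_perm (pvRemoveZeros a) (fun x => x) false).length_eq
      rw [hs] at hp
      simpa using hp.symm
    have hlb : ∀ y ∈ (v :: t : List Int), v ≤ y := by
      intro y hy
      have : y ∈ pvRemoveZeros a := (PySem.List.mem_sorted _ _ _ _).mp (hs ▸ hy)
      exact PySem.List.min?_isMin hm' y this
    have hpair : (v :: t : List Int).Pairwise (· ≤ ·) := hs ▸ PySem.List.sorted_pairwise _ _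
    have hchain : PySem.List.sorted ((((pvRemoveZeros a).map (fun x => x - v)).filter (fun x => x != 0))) (fun x => x) false
        = (t.dropWhile (fun x => x == v)).map (fun x => x - v) := by
      rw [List.filter_map]
      have hp : ((fun x => x != 0) ∘ fun x : Int => x - v) = (fun x : Int => x != v) := by
        funext x
        by_cases hxv : x = v
        · subst hxv; simp
        · have hb1 : (x != v) = true := by simp [hxv]
          have hb2 : (x - v != 0) = true := by simp [sub_ne_zero.mpr hxv]
          simp only [Function.comp_apply, hb1, hb2]
      rw [hp, pvSortedMapShift, pvSortedFilter, hs]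
      rw [pvFilterEqDropWhile v (v :: t) hpair hlb]
      rw [List.dropWhile_cons_of_pos (by simp)]
    rw [pvLoopA]
    simp only [if_neg h, dif_neg h1']
    split
    · next heq => rw [hm'] at heq; simp at heq
    · next m2 heq =>
      have hm2 : m2 = v := Option.some.inj ((hm'.symm.trans heq).symm)
      subst hm2
      show pvLoopA pr.1 (steps ++ [pr.2])
          = steps ++ pvRunScan (PySem.List.sorted (List.filter (fun x => x != 0) a) (fun x => x) false)
      rw [ih, hpr]
      simp only [List.append_assoc, List.singleton_append]
      rw [← hfil, hs, pvRunScan, hchain, pvRunScan_map, hlen]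
      push_cast
      ring_nf

-- ===== VERDICT (by name: the statement is the Claim_ definition above) =====
theorem reduceArray_spec : Claim_equal_reduceArray := by
  intro array _
  unfold Spec_reduceArray reduceArray reduceArray_alt
  simpa using pvLoopA_eq array []
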